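-- pv_equiv track=rewrite | github.com/laurigates/gha-issue-resolution | src/gha_issue_resolution/process_issues.py | parse_solution_for_changes
-- ===== SOURCE A (Python) =====
-- def parse_solution_for_changes(solution):
--     changes = {}
--     current_file = None
--     current_content = []
--
--     for line in solution.split('\n'):
--         if line.startswith('File: '):
--             if current_file:
--                 changes[current_file] = '\n'.join(current_content)
--             current_file = line.split(': ')[1].strip()
--             current_content = []
--         elif current_file:
--             current_content.append(line)
--
--     if current_file:
--         changes[current_file] = '\n'.join(current_content)
--
--     return changes
-- ===== SOURCE B (Python) =====
-- def parse_solution_for_changes(solution):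
--     lines = solution.split('\n')
--     changes = {}
--     i = 0
--     while i < len(lines):
--         line = lines[i]
--         i += 1
--         if not line.startswith('File: '):
--             continue
--         name = line.split(': ')[1].strip()
--         start = i
--         while i < len(lines) and not lines[i].startswith('File: '):
--             i += 1
--         if name:
--             changes[name] = '\n'.join(lines[start:i])
--     return changes
-- ===== Notes on version B (the rewrite author's own statement) =====
-- stated objective: alternative
-- what changed: Replaces A's line-at-a-time state machine (pending current_file/current_content plus a trailing flush after the loop) with a segment-wise scan: each 'File: ' header consumes its whole body with an inner scan and stores the segment at once, with no pending state.
import Mathlib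
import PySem

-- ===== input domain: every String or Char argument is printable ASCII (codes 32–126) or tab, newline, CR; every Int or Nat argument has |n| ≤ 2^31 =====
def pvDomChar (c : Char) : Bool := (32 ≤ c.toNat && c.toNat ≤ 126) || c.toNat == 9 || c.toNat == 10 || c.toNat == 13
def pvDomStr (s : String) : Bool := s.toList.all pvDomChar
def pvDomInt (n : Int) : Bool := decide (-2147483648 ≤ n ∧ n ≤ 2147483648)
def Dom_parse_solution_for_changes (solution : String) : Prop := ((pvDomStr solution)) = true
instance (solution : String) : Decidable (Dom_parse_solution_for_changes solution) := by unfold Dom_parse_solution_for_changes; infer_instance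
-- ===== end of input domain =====

-- B replaces A's line-at-a-time state machine (pending current_file/current_content plus a
-- trailing flush) by a segment-wise scan: at each 'File: ' header it consumes the whole body
-- with an inner scan and stores the segment at once — same values, different decomposition.


-- ===== PORT A =====
-- shared helpers (the identical Python expressions appear in both sources):
-- line.startswith('File: ')
def pvIsHeader (line : String) : Bool := PySem.Str.startswith line "File: "
-- line.split(': ')[1].strip() — index 1 always exists because line starts with "File: ",
-- so the .getD "" default is never used (Python raises nowhere here)
def pvName (line : String) : String :=
  PySem.Str.strip (PySem.List.pyGetD ((PySem.Str.split? line ": ").getD []) 1 "")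
-- Python truthiness of current_file (None or '' are falsy)
def pvTruthy (cf : Option String) : Bool :=
  match cf with
  | none => false
  | some s => !(s == "")
-- 'changes[current_file] = "\n".join(current_content)' guarded by 'if current_file:'
def pvFlush (ch : PySem.Dict String String) (cf : Option String) (cc : List String) :
    PySem.Dict String String :=
  match cf with
  | none => ch
  | some f => if f == "" then ch else ch.insert f (PySem.Str.join "\n" cc)

-- the for-loop of A, state = (changes, current_file, current_content)
def pvALoop : List String → PySem.Dict String String → Option String → List String →
    PySem.Dict String String
  | [], ch, cf, cc => pvFlush ch cf cc
  | line :: rest, ch, cf, cc =>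
    if pvIsHeader line then
      pvALoop rest (pvFlush ch cf cc) (some (pvName line)) []
    else if pvTruthy cf then
      pvALoop rest ch cf (cc ++ [line])
    else
      pvALoop rest ch cf cc

def parse_solution_for_changes (solution : String) : List (String × String) :=
  (pvALoop ((PySem.Str.split? solution "\n").getD []) PySem.Dict.empty none []).items

-- ===== PORT B =====
-- Source B's outer while over the suffix of lines starting at i; the inner while that advances i
-- over the body is takeWhile/dropWhile on the suffix; fuel = initial number of lines bounds
-- the iteration count (each step consumes at least one line, so it is never exhausted)
def pvBGo : Nat → List String → PySem.Dict String String → PySem.Dict String String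
  | 0, _, ch => ch
  | _ + 1, [], ch => ch
  | fuel + 1, line :: rest, ch =>
    if pvIsHeader line then
      pvBGo fuel (rest.dropWhile (fun l => !pvIsHeader l))
        (if pvName line == "" then ch
         else ch.insert (pvName line)
                (PySem.Str.join "\n" (rest.takeWhile (fun l => !pvIsHeader l))))
    else
      pvBGo fuel rest ch

def parse_solution_for_changes_alt (solution : String) : List (String × String) :=
  (pvBGo ((PySem.Str.split? solution "\n").getD []).length ((PySem.Str.split? solution "\n").getD [])
    PySem.Dict.empty).items

-- ===== PRECONDITION & SPEC =====
def Spec_parse_solution_for_changes (solution : String) (out : List (String × String)) : Prop := out = parse_solution_for_changes_alt solution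
instance (solution : String) (out : List (String × String)) : Decidable (Spec_parse_solution_for_changes solution out) := by unfold Spec_parse_solution_for_changes; infer_instance

-- ===== CLAIM (what is proved, stated in full; the proofs are below) =====
def Claim_equal_parse_solution_for_changes : Prop := ∀ (solution : String), Dom_parse_solution_for_changes solution → Spec_parse_solution_for_changes solution (parse_solution_for_changes solution)

-- ===== LEMMAS AND PROOFS =====

-- the fuel argument is irrelevant as long as it dominates the list length
lemma pvBGo_fuel_irrel : ∀ (fuel fuel' : Nat) (ls : List String) (ch : PySem.Dict String String),
    ls.length ≤ fuel → ls.length ≤ fuel' → pvBGo fuel ls ch = pvBGo fuel' ls ch := by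
  intro fuel
  induction fuel with
  | zero =>
    intro fuel' ls ch h _
    have : ls = [] := List.eq_nil_of_length_eq_zero (Nat.le_zero.mp h)
    subst this
    cases fuel' <;> simp [pvBGo]
  | succ f ih =>
    intro fuel' ls ch h h'
    cases ls with
    | nil => cases fuel' <;> simp [pvBGo]
    | cons l rest =>
      cases fuel' with
      | zero => simp at h'
      | succ f' =>
        have h1 : rest.length ≤ f := by simp at h; omega
        have h2 : rest.length ≤ f' := by simp at h'; omega
        have hd := List.length_dropWhile_le (fun l => !pvIsHeader l) rest
        simp only [pvBGo]
        split
        · exact ih f' _ _ (by omega) (by omega)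
        · exact ih f' _ _ h1 h2

-- B skips non-header lines one at a time: skipping them all at once is the same
lemma pvBGo_dropWhile : ∀ (ls : List String) (fuel : Nat) (ch : PySem.Dict String String),
    ls.length ≤ fuel →
    pvBGo fuel ls ch = pvBGo fuel (ls.dropWhile (fun l => !pvIsHeader l)) ch := by
  intro ls
  induction ls with
  | nil => intro fuel ch _; simp
  | cons l rest ih =>
    intro fuel ch h
    cases fuel with
    | zero => simp at h
    | succ f =>
      by_cases hl : pvIsHeader l
      · simp [hl]
      · have hlen : rest.length ≤ f := by simp at h; omega
        have hd := List.length_dropWhile_le (fun l => !pvIsHeader l) rest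
        have e1 : pvBGo (f + 1) (l :: rest) ch = pvBGo f rest ch := by simp [pvBGo, hl]
        have e2 : (l :: rest).dropWhile (fun l => !pvIsHeader l) =
            rest.dropWhile (fun l => !pvIsHeader l) := by simp [hl]
        rw [e1, e2, ih f ch hlen, pvBGo_fuel_irrel f (f + 1) _ ch (by omega) (by omega)]

-- the main invariant: A's state machine vs B's segment scan.
-- F: with a falsy current_file, A on ls equals B on ls.
-- T: with a truthy current_file f and pending content cc, A on ls equals B on the suffix
--    after the current body, with (f ↦ cc ++ body) already stored.
lemma pvMain : ∀ (ls : List String) (fuel : Nat), ls.length ≤ fuel →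
    ∀ (ch : PySem.Dict String String) (cf : Option String) (cc : List String),
    (pvTruthy cf = false → pvALoop ls ch cf cc = pvBGo fuel ls ch) ∧
    (∀ f, cf = some f → (f == "") = false →
      pvALoop ls ch cf cc =
        pvBGo fuel (ls.dropWhile (fun l => !pvIsHeader l))
          (ch.insert f (PySem.Str.join "\n" (cc ++ ls.takeWhile (fun l => !pvIsHeader l))))) := by
  intro ls
  induction ls with
  | nil =>
    intro fuel _ ch cf cc
    constructor
    · intro hF
      cases cf with
      | none => cases fuel <;> simp [pvALoop, pvFlush, pvBGo]
      | some s =>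
        have hs : (s == "") = true := by simpa [pvTruthy] using hF
        cases fuel <;> simp [pvALoop, pvFlush, hs, pvBGo]
    · intro f hcf hf
      subst hcf
      cases fuel <;> simp [pvALoop, pvFlush, hf, pvBGo]
  | cons l rest ih =>
    intro fuel hlen ch cf cc
    cases fuel with
    | zero => simp at hlen
    | succ fl =>
    have hrest : rest.length ≤ fl := by simp at hlen; omega
    by_cases hl : pvIsHeader l
    · -- header line: A flushes and starts a new segment; B opens a segment here
      have step : ∀ ch', pvALoop rest ch' (some (pvName l)) [] =
          pvBGo fl (rest.dropWhile (fun l => !pvIsHeader l))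
            (if pvName l == "" then ch'
             else ch'.insert (pvName l)
                    (PySem.Str.join "\n" (rest.takeWhile (fun l => !pvIsHeader l)))) := by
        intro ch'
        by_cases hn : (pvName l == "") = true
        · have hfalsy : pvTruthy (some (pvName l)) = false := by simp [pvTruthy, hn]
          rw [(ih fl hrest ch' (some (pvName l)) []).1 hfalsy, hn, if_pos rfl,
            pvBGo_dropWhile rest fl ch' hrest]
        · rw [(ih fl hrest ch' (some (pvName l)) []).2 (pvName l) rfl (by simpa using hn)]
          simp [hn]
      constructor
      · intro hF
        have hflush : pvFlush ch cf cc = ch := by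
          cases cf with
          | none => rfl
          | some s =>
            have hs : (s == "") = true := by simpa [pvTruthy] using hF
            simp [pvFlush, hs]
        simp only [pvALoop, hl, if_pos, hflush, pvBGo]
        exact step ch
      · intro f hcf hf
        subst hcf
        have htw : (l :: rest).takeWhile (fun l => !pvIsHeader l) = [] := by
          simp [hl]
        have hdw : (l :: rest).dropWhile (fun l => !pvIsHeader l) = l :: rest := by
          simp [hl]
        rw [htw, hdw]
        simp only [pvALoop, hl, if_pos, pvFlush, hf, Bool.false_eq_true, if_false, pvBGo,
          List.append_nil]
        exact step _
    · -- non-header line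
      constructor
      · intro hF
        simp only [pvALoop, hl, Bool.false_eq_true, if_false, hF, pvBGo]
        exact (ih fl hrest ch cf cc).1 hF
      · intro f hcf hf
        subst hcf
        have htw : (l :: rest).takeWhile (fun l => !pvIsHeader l) =
            l :: rest.takeWhile (fun l => !pvIsHeader l) := by
          simp [hl]
        have hdw : (l :: rest).dropWhile (fun l => !pvIsHeader l) =
            rest.dropWhile (fun l => !pvIsHeader l) := by
          simp [hl]
        have htr : pvTruthy (some f) = true := by simp [pvTruthy, hf]
        rw [htw, hdw]
        simp only [pvALoop, hl, Bool.false_eq_true, if_false, htr, if_pos]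
        rw [(ih fl hrest ch (some f) (cc ++ [l])).2 f rfl hf,
          pvBGo_fuel_irrel fl (fl + 1) _ _
            (le_trans (List.length_dropWhile_le _ _) hrest)
            (le_trans (List.length_dropWhile_le _ _) (by omega))]
        simp

-- ===== VERDICT (by name: the statement is the Claim_ definition above) =====
theorem parse_solution_for_changes_spec : Claim_equal_parse_solution_for_changes := by
  intro solution _
  unfold Spec_parse_solution_for_changes parse_solution_for_changes parse_solution_for_changes_alt
  rw [(pvMain ((PySem.Str.split? solution "\n").getD []) ((PySem.Str.split? solution "\n").getD []).length le_rfl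
    PySem.Dict.empty none []).1 rfl]
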